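-- pv_equiv track=rewrite | github.com/pypi-data/pypi-mirror-342 | packages/kcpp/kcpp-0.7-py3-none-any.whl/kcpp/unicode/charset.py | utf8_cp
-- ===== SOURCE A (Python) =====
-- def utf8_cp(raw, offset):
--     '''Return (c, size) where c is the code point of the character given by the UTF-8 encoding
--     starting at offset and size is the number of bytes consumed.
--
--     If the encoding is invalid return (-1, size).
--
--     If EOF is reached (-1, size) is returned as for any other invlalid sequence.  This is
--     the only way that a size of 0 is returned.
--
--     (-2, size) is returned for over-long encodings, and (-3, size) for surrogate encodings.
--     '''
--     n = 0
--     try: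
--         c = raw[offset]
--         size = _UTF8_sequence_len[c]
--         if not size:
--             return -1, 1
--
--         c &= _UTF8_masks[size - 1]
--         for n in range(1, size):
--             d = raw[offset + n]
--             if not (0x80 <= d < 0xc0):
--                 return -1, n  # Invalid encoding
--             c = (c << 6) + (d & 0x3f)
--     except IndexError:
--         return -1, n      # EOF mid-sequence
--
--     # Check encoded value for validity
--     if c >= 0x110000:
--         c = -1            # Invalid encoding - not a codepoint
--     elif c < _UTF8_minima[size - 1]:
--         c = -2            # Over-long encoding
--     elif 0xD800 <= c <= 0xDFFF:
--         c = -3            # Surrogate encoding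
--
--     return c, size
--
-- _UTF8_sequence_len = [1] * 128 + [0] * 64 + [2] * 32 + [3] * 16 + [4] * 8 + [0] * 8
--
-- _UTF8_minima = [0x00, 0x80, 0x800, 0x10000]
--
-- _UTF8_masks = [0x7f, 0x1f, 0x0f, 0x07]
-- ===== SOURCE B (Python) =====
-- def _cont(raw, j):
--     '''The 6 payload bits of the continuation byte at j, or None if absent/invalid.'''
--     if j < len(raw):
--         d = raw[j]
--         if 0x80 <= d < 0xC0:
--             return d & 0x3F
--     return None
--
--
-- def _checked(cp, lo, size):
--     '''Final validity cascade on an assembled code point.'''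
--     if cp >= 0x110000:
--         return -1, size
--     if cp < lo:
--         return -2, size
--     if 0xD800 <= cp <= 0xDFFF:
--         return -3, size
--     return cp, size
--
--
-- def utf8_cp(raw, offset):
--     if not 0 <= offset < len(raw):
--         return -1, 0          # EOF: nothing to decode
--     c = raw[offset]
--     if c < 0x80:
--         return c, 1           # ASCII
--     if c < 0xC0 or c >= 0xF8:
--         return -1, 1          # stray continuation byte or invalid lead
--     d = _cont(raw, offset + 1)
--     if d is None:
--         return -1, 1
--     if c < 0xE0:
--         return _checked((c & 0x1F) * 0x40 + d, 0x80, 2)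
--     e = _cont(raw, offset + 2)
--     if e is None:
--         return -1, 2
--     if c < 0xF0:
--         return _checked((c & 0x0F) * 0x1000 + d * 0x40 + e, 0x800, 3)
--     f = _cont(raw, offset + 3)
--     if f is None:
--         return -1, 3
--     return _checked((c & 0x07) * 0x40000 + d * 0x1000 + e * 0x40 + f, 0x10000, 4)
-- ===== Notes on version B (the rewrite author's own statement) =====
-- stated objective: alternative
-- what changed: B replaces A's three module-level lookup tables, masking loop and try/except IndexError handling with an explicit branch on the lead byte's range and fully unrolled, individually validated reads of the 1-3 continuation bytes; Pre_ restricts to the natural domain (an offset that is nonnegative or past the start, with a byte-valued 0-255 lead if one exists), excluding wrapping negative offsets and non-byte lead values on which A's results are accidents of Python's negative list/table indexing and the caught IndexError.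
-- outside the precondition, e.g. on utf8_cp([300], 0): A returns (-1, 0), B returns (-1, 1); on utf8_cp([65], -1): A returns (65, 1), B returns (-1, 0); on utf8_cp([-62, 128], 0): A returns (128, 2), B returns (-62, 1)
import Mathlib
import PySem

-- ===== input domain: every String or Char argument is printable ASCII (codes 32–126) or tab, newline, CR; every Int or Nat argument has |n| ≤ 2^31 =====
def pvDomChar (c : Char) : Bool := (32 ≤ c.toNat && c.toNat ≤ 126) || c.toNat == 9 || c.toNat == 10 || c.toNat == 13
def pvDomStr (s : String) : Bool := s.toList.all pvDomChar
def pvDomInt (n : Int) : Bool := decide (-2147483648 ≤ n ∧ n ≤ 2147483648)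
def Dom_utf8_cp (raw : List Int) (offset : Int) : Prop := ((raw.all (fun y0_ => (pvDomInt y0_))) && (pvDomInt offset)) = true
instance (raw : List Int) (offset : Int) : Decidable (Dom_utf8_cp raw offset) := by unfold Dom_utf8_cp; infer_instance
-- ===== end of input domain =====

-- B drops A's three module tables, continuation loop and exception handling: it branches on the
-- lead byte's range and reads/validates each continuation byte explicitly (objective: alternative).

-- ===== PORT A =====
def utf8SeqLen : List Int :=
  List.replicate 128 1 ++ List.replicate 64 0 ++ List.replicate 32 2 ++
  List.replicate 16 3 ++ List.replicate 8 4 ++ List.replicate 8 0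

def utf8Minima : List Int := [0x00, 0x80, 0x800, 0x10000]

def utf8Masks : List Int := [0x7f, 0x1f, 0x0f, 0x07]

-- 'for n in range(1, size)' with the early returns, structurally on the number of remaining
-- iterations (rem = size - n); .inl = a 'return' fired (also the caught IndexError of
-- raw[offset + n]), .inr = the loop ran to the end with final c.
def utf8Loop (raw : List Int) (offset : Int) (n : Nat) (rem : Nat) (c : Int) : Sum (Int × Int) Int :=
  match rem with
  | 0 => .inr c
  | rem + 1 =>
    match PySem.List.pyGet? raw (offset + (n : Int)) with
    | none => .inl (-1, (n : Int))            -- IndexError caught: return (-1, n)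
    | some d =>
      if 0x80 ≤ d ∧ d < 0xC0 then
        -- (c << 6) + (d & 0x3f): here c ≥ 0 and 0x80 ≤ d, so this is c * 64 + d % 64 exactly
        utf8Loop raw offset (n + 1) rem (c * 64 + d % 64)
      else .inl (-1, (n : Int))               -- invalid encoding: return (-1, n)

def utf8_cp (raw : List Int) (offset : Int) : Int × Int :=
  match PySem.List.pyGet? raw offset with
  | none => (-1, 0)                           -- IndexError caught with n = 0
  | some c =>
    match PySem.List.pyGet? utf8SeqLen c with
    | none => (-1, 0)                         -- table IndexError (c outside [-256,255]) caught, n = 0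
    | some size =>
      if size = 0 then (-1, 1)
      else
        match PySem.List.pyGet? utf8Masks (size - 1) with
        | none => (-1, 0)                     -- unreachable (size ∈ {1,2,3,4}); a caught IndexError would give (-1, 0)
        | some mask =>
          -- c &= mask: mask + 1 is a power of two, so Python's c & mask = c % (mask+1) for every int c
          match utf8Loop raw offset 1 (size.toNat - 1) (c % (mask + 1)) with
          | .inl r => r
          | .inr c =>
            let c := if c ≥ 0x110000 then -1
                     else if c < PySem.List.pyGetD utf8Minima (size - 1) 0 then -2  -- index always in range: size ∈ {1,2,3,4}
                     else if 0xD800 ≤ c ∧ c ≤ 0xDFFF then -3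
                     else c
            (c, size)

-- ===== PORT B =====
-- the 6 payload bits of the continuation byte at j, or none if absent/invalid;
-- call sites have 0 ≤ j, so the guarded raw[j] is pyGetD (the default is never used)
def utf8Cont? (raw : List Int) (j : Int) : Option Int :=
  if j < (raw.length : Int) then
    let d := PySem.List.pyGetD raw j 0
    if 0x80 ≤ d ∧ d < 0xC0 then some (d % 64) else none  -- d & 0x3F with 0x80 ≤ d
  else none

-- final validity cascade on an assembled code point
def utf8Checked (cp lo size : Int) : Int × Int :=
  if cp ≥ 0x110000 then (-1, size)
  else if cp < lo then (-2, size)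
  else if 0xD800 ≤ cp ∧ cp ≤ 0xDFFF then (-3, size)
  else (cp, size)

def utf8_cp_alt (raw : List Int) (offset : Int) : Int × Int :=
  if ¬ (0 ≤ offset ∧ offset < (raw.length : Int)) then (-1, 0)  -- EOF: nothing to decode
  else
    let c := PySem.List.pyGetD raw offset 0   -- in range by the guard
    if c < 0x80 then (c, 1)                   -- ASCII
    else if c < 0xC0 ∨ 0xF8 ≤ c then (-1, 1)  -- stray continuation byte or invalid lead
    else
      match utf8Cont? raw (offset + 1) with
      | none => (-1, 1)
      | some d =>
        if c < 0xE0 then utf8Checked ((c % 0x20) * 0x40 + d) 0x80 2     -- (c & 0x1F) * 0x40 + d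
        else
          match utf8Cont? raw (offset + 2) with
          | none => (-1, 2)
          | some e =>
            if c < 0xF0 then utf8Checked ((c % 0x10) * 0x1000 + d * 0x40 + e) 0x800 3
            else
              match utf8Cont? raw (offset + 3) with
              | none => (-1, 3)
              | some f => utf8Checked ((c % 0x08) * 0x40000 + d * 0x1000 + e * 0x40 + f) 0x10000 4

-- ===== PRECONDITION & SPEC =====
-- Pre_ restricts to the function's natural domain — an offset that is not a wrapping negative
-- index (nonnegative, or past the start so that nothing can be read) and whose LEAD byte, if any,
-- is a byte value (0 ≤ c < 256): outside it A still returns values, but they are accidents of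
-- Python's negative list/table indexing and of the caught IndexError on the lookup table, not
-- byte decoding. (Continuation bytes need no restriction: both versions test 0x80 ≤ d < 0xC0.)
def Pre_utf8_cp (raw : List Int) (offset : Int) : Prop :=
  (0 ≤ offset ∨ offset < -(raw.length : Int)) ∧ (0 ≤ offset → offset < (raw.length : Int) →
    0 ≤ raw.getD offset.toNat 0 ∧ raw.getD offset.toNat 0 < 256)
instance (raw : List Int) (offset : Int) : Decidable (Pre_utf8_cp raw offset) := by
  unfold Pre_utf8_cp; infer_instance

def pvWitness_utf8_cp : List Int × Int := ([0xC3, 0xA9], 0)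

def Spec_utf8_cp (raw : List Int) (offset : Int) (out : Int × Int) : Prop := out = utf8_cp_alt raw offset
instance (raw : List Int) (offset : Int) (out : Int × Int) : Decidable (Spec_utf8_cp raw offset out) := by
  unfold Spec_utf8_cp; infer_instance

-- ===== CLAIM (what is proved, stated in full; the proofs are below) =====
def Claim_equal_utf8_cp : Prop := ∀ (raw : List Int) (offset : Int), Dom_utf8_cp raw offset → Pre_utf8_cp raw offset → Spec_utf8_cp raw offset (utf8_cp raw offset)

-- ===== LEMMAS AND PROOFS =====

-- under 0 ≤ j, B's guarded raw[j] agrees with A's pyGet?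
theorem byte_get (raw : List Int) (j : Int) (h0 : 0 ≤ j) (h1 : j < (raw.length : Int)) :
    PySem.List.pyGet? raw j = some (PySem.List.pyGetD raw j 0) := by
  rw [PySem.List.pyGet?_eq_some_getElem raw h0 h1, PySem.List.pyGetD_eq_getElem raw 0 h0 h1]

theorem byte_get_none (raw : List Int) (j : Int) (_h0 : 0 ≤ j) (h1 : ¬ j < (raw.length : Int)) :
    PySem.List.pyGet? raw j = none := by
  rw [PySem.List.pyGet?_eq_none_iff]
  simp [PySem.Raise.InRange]
  omega

theorem utf8Cont?_eq (raw : List Int) (j : Int) (h0 : 0 ≤ j) :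
    utf8Cont? raw j = match PySem.List.pyGet? raw j with
      | some d => if 0x80 ≤ d ∧ d < 0xC0 then some (d % 64) else none
      | none => none := by
  unfold utf8Cont?
  by_cases h : j < (raw.length : Int)
  · rw [if_pos h, byte_get raw j h0 h]
  · rw [if_neg h, byte_get_none raw j h0 h]

set_option maxRecDepth 8192 in
theorem seqLen_getElem? (n : Nat) (h : n < 256) :
    utf8SeqLen[n]? = some (if n < 128 then 1 else if n < 192 then 0 else if n < 224 then 2
          else if n < 240 then 3 else if n < 248 then 4 else 0) := by
  unfold utf8SeqLen
  rw [List.getElem?_append, List.getElem?_append, List.getElem?_append, List.getElem?_append,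
    List.getElem?_append]
  simp only [List.getElem?_replicate, List.length_append, List.length_replicate]
  split_ifs <;> first | rfl | omega

theorem seqLen_pyGet? (c : Int) (h0 : 0 ≤ c) (h1 : c < 256) :
    PySem.List.pyGet? utf8SeqLen c = some (
      if c.toNat < 128 then 1 else if c.toNat < 192 then 0
      else if c.toNat < 224 then 2 else if c.toNat < 240 then 3
      else if c.toNat < 248 then 4 else 0) := by
  rw [PySem.List.pyGet?_of_nonneg _ h0, seqLen_getElem? _ (by omega)]

-- A's validity cascade is exactly utf8Checked
theorem cascade_eq (cp lo size : Int) :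
    ((if cp ≥ 0x110000 then (-1:Int)
      else if cp < lo then -2
      else if 0xD800 ≤ cp ∧ cp ≤ 0xDFFF then -3
      else cp), size) = utf8Checked cp lo size := by
  unfold utf8Checked
  split_ifs <;> rfl

theorem hmask1 : PySem.List.pyGet? utf8Masks ((1:Int) - 1) = some 127 := by decide
theorem hmask2 : PySem.List.pyGet? utf8Masks ((2:Int) - 1) = some 31 := by decide
theorem hmask3 : PySem.List.pyGet? utf8Masks ((3:Int) - 1) = some 15 := by decide
theorem hmask4 : PySem.List.pyGet? utf8Masks ((4:Int) - 1) = some 7 := by decide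
theorem hmin1 : PySem.List.pyGetD utf8Minima ((1:Int) - 1) 0 = 0 := by decide
theorem hmin2 : PySem.List.pyGetD utf8Minima ((2:Int) - 1) 0 = 128 := by decide
theorem hmin3 : PySem.List.pyGetD utf8Minima ((3:Int) - 1) 0 = 2048 := by decide
theorem hmin4 : PySem.List.pyGetD utf8Minima ((4:Int) - 1) 0 = 65536 := by decide

-- one, two and three unrollings of A's continuation loop
theorem loop12 (raw : List Int) (offset c0 : Int) :
    utf8Loop raw offset 1 1 c0 = match PySem.List.pyGet? raw (offset + 1) with
      | none => .inl (-1, 1)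
      | some d => if 0x80 ≤ d ∧ d < 0xC0 then .inr (c0 * 64 + d % 64) else .inl (-1, 1) := by
  unfold utf8Loop
  norm_num
  rcases PySem.List.pyGet? raw (offset + 1) with _ | d
  · rfl
  · dsimp only
    split_ifs <;> rfl

theorem loop13 (raw : List Int) (offset c0 : Int) :
    utf8Loop raw offset 1 2 c0 = match PySem.List.pyGet? raw (offset + 1) with
      | none => .inl (-1, 1)
      | some d =>
        if 0x80 ≤ d ∧ d < 0xC0 then
          match PySem.List.pyGet? raw (offset + 2) with
          | none => .inl (-1, 2)
          | some e => if 0x80 ≤ e ∧ e < 0xC0 then .inr ((c0 * 64 + d % 64) * 64 + e % 64)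
                      else .inl (-1, 2)
        else .inl (-1, 1) := by
  unfold utf8Loop
  norm_num
  rcases PySem.List.pyGet? raw (offset + 1) with _ | d
  · rfl
  · dsimp only
    split_ifs with hd
    · unfold utf8Loop
      norm_num
      rcases PySem.List.pyGet? raw (offset + 2) with _ | e
      · rfl
      · dsimp only
        split_ifs <;> rfl
    · rfl

theorem loop14 (raw : List Int) (offset c0 : Int) :
    utf8Loop raw offset 1 3 c0 = match PySem.List.pyGet? raw (offset + 1) with
      | none => .inl (-1, 1)
      | some d =>
        if 0x80 ≤ d ∧ d < 0xC0 then
          match PySem.List.pyGet? raw (offset + 2) with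
          | none => .inl (-1, 2)
          | some e =>
            if 0x80 ≤ e ∧ e < 0xC0 then
              match PySem.List.pyGet? raw (offset + 3) with
              | none => .inl (-1, 3)
              | some f => if 0x80 ≤ f ∧ f < 0xC0 then
                            .inr (((c0 * 64 + d % 64) * 64 + e % 64) * 64 + f % 64)
                          else .inl (-1, 3)
            else .inl (-1, 2)
        else .inl (-1, 1) := by
  unfold utf8Loop
  norm_num
  rcases PySem.List.pyGet? raw (offset + 1) with _ | d
  · rfl
  · dsimp only
    split_ifs with hd
    · unfold utf8Loop
      norm_num
      rcases PySem.List.pyGet? raw (offset + 2) with _ | e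
      · rfl
      · dsimp only
        split_ifs with he
        · unfold utf8Loop
          norm_num
          rcases PySem.List.pyGet? raw (offset + 3) with _ | f
          · rfl
          · dsimp only
            split_ifs <;> rfl
        · rfl
    · rfl

theorem case_size1 (raw : List Int) (offset c : Int) (hoff : 0 ≤ offset)
    (hlt : offset < (raw.length : Int)) (hc : PySem.List.pyGetD raw offset 0 = c)
    (hin : 0 ≤ c ∧ c < 256) (hr : c < 0x80) :
    utf8_cp raw offset = utf8_cp_alt raw offset := by
  have hget := byte_get raw offset hoff hlt
  rw [hc] at hget
  have htab : PySem.List.pyGet? utf8SeqLen c = some 1 := by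
    rw [seqLen_pyGet? c (by omega) (by omega)]
    split_ifs <;> first | rfl | omega
  unfold utf8_cp utf8_cp_alt
  rw [hget]
  dsimp only
  rw [htab]
  dsimp only
  rw [if_neg (show ¬(1:Int) = 0 by norm_num), hmask1]
  dsimp only
  rw [show ((1:Int).toNat - 1 : Nat) = 0 from rfl]
  rw [show utf8Loop raw offset 1 0 (c % (127 + 1)) = .inr (c % (127 + 1)) from rfl]
  dsimp only
  rw [hmin1]
  rw [if_neg (show ¬¬(0 ≤ offset ∧ offset < (raw.length : Int)) by tauto)]
  rw [hc, if_pos hr]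
  rw [if_neg (show ¬(c % (127 + 1) ≥ 0x110000) by omega),
    if_neg (show ¬(c % (127 + 1) < 0) by omega),
    if_neg (show ¬(0xD800 ≤ c % (127 + 1) ∧ c % (127 + 1) ≤ 0xDFFF) by omega)]
  rw [show c % (127 + 1) = c by omega]

theorem case_size0 (raw : List Int) (offset c : Int) (hoff : 0 ≤ offset)
    (hlt : offset < (raw.length : Int)) (hc : PySem.List.pyGetD raw offset 0 = c)
    (hin : 0 ≤ c ∧ c < 256)
    (hr : (0x80 ≤ c ∧ c < 0xC0) ∨ (0xF8 ≤ c ∧ c < 0x100)) :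
    utf8_cp raw offset = utf8_cp_alt raw offset := by
  have hget := byte_get raw offset hoff hlt
  rw [hc] at hget
  have htab : PySem.List.pyGet? utf8SeqLen c = some 0 := by
    rw [seqLen_pyGet? c (by omega) (by omega)]
    split_ifs <;> first | rfl | omega
  unfold utf8_cp utf8_cp_alt
  rw [hget]
  dsimp only
  rw [htab]
  dsimp only
  rw [if_pos rfl,
    if_neg (show ¬¬(0 ≤ offset ∧ offset < (raw.length : Int)) by tauto)]
  rw [hc,
    if_neg (show ¬(c < 0x80) by omega),
    if_pos (show c < 0xC0 ∨ 0xF8 ≤ c by omega)]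

theorem case_size2 (raw : List Int) (offset c : Int) (hoff : 0 ≤ offset)
    (hlt : offset < (raw.length : Int)) (hc : PySem.List.pyGetD raw offset 0 = c)
    (hin : 0 ≤ c ∧ c < 256) (hr : 0xC0 ≤ c ∧ c < 0xE0) :
    utf8_cp raw offset = utf8_cp_alt raw offset := by
  have hget := byte_get raw offset hoff hlt
  rw [hc] at hget
  have htab : PySem.List.pyGet? utf8SeqLen c = some 2 := by
    rw [seqLen_pyGet? c (by omega) (by omega)]
    split_ifs <;> first | rfl | omega
  unfold utf8_cp utf8_cp_alt
  rw [hget]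
  dsimp only
  rw [htab]
  dsimp only
  rw [if_neg (show ¬(2:Int) = 0 by norm_num), hmask2]
  dsimp only
  rw [show ((2:Int).toNat - 1 : Nat) = 1 from rfl, loop12]
  rw [if_neg (show ¬¬(0 ≤ offset ∧ offset < (raw.length : Int)) by tauto)]
  rw [hc,
    if_neg (show ¬(c < 0x80) by omega),
    if_neg (show ¬(c < 0xC0 ∨ 0xF8 ≤ c) by omega),
    utf8Cont?_eq raw (offset + 1) (by omega)]
  rcases h1 : PySem.List.pyGet? raw (offset + 1) with _ | d
  · rfl
  · dsimp only
    by_cases hd : 0x80 ≤ d ∧ d < 0xC0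
    · rw [if_pos hd, if_pos hd]
      dsimp only
      rw [if_pos (show c < 0xE0 by omega), hmin2, cascade_eq,
        show c % 0x20 * 0x40 + d % 64 = c % (31 + 1) * 64 + d % 64 by norm_num]
    · rw [if_neg hd, if_neg hd]

theorem case_size3 (raw : List Int) (offset c : Int) (hoff : 0 ≤ offset)
    (hlt : offset < (raw.length : Int)) (hc : PySem.List.pyGetD raw offset 0 = c)
    (hin : 0 ≤ c ∧ c < 256) (hr : 0xE0 ≤ c ∧ c < 0xF0) :
    utf8_cp raw offset = utf8_cp_alt raw offset := by
  have hget := byte_get raw offset hoff hlt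
  rw [hc] at hget
  have htab : PySem.List.pyGet? utf8SeqLen c = some 3 := by
    rw [seqLen_pyGet? c (by omega) (by omega)]
    split_ifs <;> first | rfl | omega
  unfold utf8_cp utf8_cp_alt
  rw [hget]
  dsimp only
  rw [htab]
  dsimp only
  rw [if_neg (show ¬(3:Int) = 0 by norm_num), hmask3]
  dsimp only
  rw [show ((3:Int).toNat - 1 : Nat) = 2 from rfl, loop13]
  rw [if_neg (show ¬¬(0 ≤ offset ∧ offset < (raw.length : Int)) by tauto)]
  rw [hc,
    if_neg (show ¬(c < 0x80) by omega),
    if_neg (show ¬(c < 0xC0 ∨ 0xF8 ≤ c) by omega),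
    utf8Cont?_eq raw (offset + 1) (by omega)]
  rcases h1 : PySem.List.pyGet? raw (offset + 1) with _ | d
  · rfl
  · dsimp only
    by_cases hd : 0x80 ≤ d ∧ d < 0xC0
    · rw [if_pos hd, if_pos hd]
      dsimp only
      rw [if_neg (show ¬(c < 0xE0) by omega), utf8Cont?_eq raw (offset + 2) (by omega)]
      rcases h2 : PySem.List.pyGet? raw (offset + 2) with _ | e
      · rfl
      · dsimp only
        by_cases he : 0x80 ≤ e ∧ e < 0xC0
        · rw [if_pos he, if_pos he]
          dsimp only
          rw [if_pos (show c < 0xF0 by omega), hmin3, cascade_eq,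
            show c % 0x10 * 0x1000 + d % 64 * 0x40 + e % 64
              = (c % (15 + 1) * 64 + d % 64) * 64 + e % 64 by ring_nf]
        · rw [if_neg he, if_neg he]
    · rw [if_neg hd, if_neg hd]

theorem case_size4 (raw : List Int) (offset c : Int) (hoff : 0 ≤ offset)
    (hlt : offset < (raw.length : Int)) (hc : PySem.List.pyGetD raw offset 0 = c)
    (hin : 0 ≤ c ∧ c < 256) (hr : 0xF0 ≤ c ∧ c < 0xF8) :
    utf8_cp raw offset = utf8_cp_alt raw offset := by
  have hget := byte_get raw offset hoff hlt
  rw [hc] at hget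
  have htab : PySem.List.pyGet? utf8SeqLen c = some 4 := by
    rw [seqLen_pyGet? c (by omega) (by omega)]
    split_ifs <;> first | rfl | omega
  unfold utf8_cp utf8_cp_alt
  rw [hget]
  dsimp only
  rw [htab]
  dsimp only
  rw [if_neg (show ¬(4:Int) = 0 by norm_num), hmask4]
  dsimp only
  rw [show ((4:Int).toNat - 1 : Nat) = 3 from rfl, loop14]
  rw [if_neg (show ¬¬(0 ≤ offset ∧ offset < (raw.length : Int)) by tauto)]
  rw [hc,
    if_neg (show ¬(c < 0x80) by omega),
    if_neg (show ¬(c < 0xC0 ∨ 0xF8 ≤ c) by omega),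
    utf8Cont?_eq raw (offset + 1) (by omega)]
  rcases h1 : PySem.List.pyGet? raw (offset + 1) with _ | d
  · rfl
  · dsimp only
    by_cases hd : 0x80 ≤ d ∧ d < 0xC0
    · rw [if_pos hd, if_pos hd]
      dsimp only
      rw [if_neg (show ¬(c < 0xE0) by omega), utf8Cont?_eq raw (offset + 2) (by omega)]
      rcases h2 : PySem.List.pyGet? raw (offset + 2) with _ | e
      · rfl
      · dsimp only
        by_cases he : 0x80 ≤ e ∧ e < 0xC0
        · rw [if_pos he, if_pos he]
          dsimp only
          rw [if_neg (show ¬(c < 0xF0) by omega), utf8Cont?_eq raw (offset + 3) (by omega)]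
          rcases h3 : PySem.List.pyGet? raw (offset + 3) with _ | f
          · rfl
          · dsimp only
            by_cases hf : 0x80 ≤ f ∧ f < 0xC0
            · rw [if_pos hf, if_pos hf]
              dsimp only
              rw [hmin4, cascade_eq,
                show c % 0x08 * 0x40000 + d % 64 * 0x1000 + e % 64 * 0x40 + f % 64
                  = ((c % (7 + 1) * 64 + d % 64) * 64 + e % 64) * 64 + f % 64 by ring_nf]
            · rw [if_neg hf, if_neg hf]
        · rw [if_neg he, if_neg he]
    · rw [if_neg hd, if_neg hd]

theorem main_eq (raw : List Int) (offset : Int)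
    (hoffs : 0 ≤ offset ∨ offset < -(raw.length : Int))
    (hlead' : 0 ≤ offset → offset < (raw.length : Int) →
      0 ≤ raw.getD offset.toNat 0 ∧ raw.getD offset.toNat 0 < 256) :
    utf8_cp raw offset = utf8_cp_alt raw offset := by
  rcases hoffs with hoff | hneg
  case inr =>   -- offset before the start of raw: IndexError in A, failed guard in B, both (-1, 0)
    unfold utf8_cp utf8_cp_alt
    rw [show PySem.List.pyGet? raw offset = none by
        rw [PySem.List.pyGet?_eq_none_iff]; simp [PySem.Raise.InRange]; omega,
      if_pos (show ¬(0 ≤ offset ∧ offset < (raw.length : Int)) by omega)]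
  have hlead := hlead' hoff
  by_cases hlt : offset < (raw.length : Int)
  · set c := PySem.List.pyGetD raw offset 0 with hc
    have hin : 0 ≤ c ∧ c < 256 := by
      have h1 : c = raw[offset.toNat] := by
        rw [hc, PySem.List.pyGetD_eq_getElem raw 0 hoff hlt]
      have h2 : raw.getD offset.toNat 0 = raw[offset.toNat] :=
        List.getD_eq_getElem raw 0 (by omega)
      rw [h1, ← h2]; exact hlead hlt
    by_cases r1 : c < 0x80
    · exact case_size1 raw offset c hoff hlt hc.symm hin r1
    · by_cases r2 : c < 0xC0
      · exact case_size0 raw offset c hoff hlt hc.symm hin (Or.inl ⟨by omega, r2⟩)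
      · by_cases r3 : c < 0xE0
        · exact case_size2 raw offset c hoff hlt hc.symm hin ⟨by omega, r3⟩
        · by_cases r4 : c < 0xF0
          · exact case_size3 raw offset c hoff hlt hc.symm hin ⟨by omega, r4⟩
          · by_cases r5 : c < 0xF8
            · exact case_size4 raw offset c hoff hlt hc.symm hin ⟨by omega, r5⟩
            · exact case_size0 raw offset c hoff hlt hc.symm hin (Or.inr ⟨by omega, by omega⟩)
  · unfold utf8_cp utf8_cp_alt
    rw [byte_get_none raw offset hoff hlt,
      if_pos (show ¬(0 ≤ offset ∧ offset < (raw.length : Int)) by tauto)]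

-- ===== VERDICT (by name: the statement is the Claim_ definition above) =====
theorem utf8_cp_spec : Claim_equal_utf8_cp := by
  intro raw offset _ hpre
  exact main_eq raw offset hpre.1 hpre.2
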